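-- pv_equiv track=rewrite | github.com/g-nitin-1/Lakehouse_Analytics_Pipeline | src/lakehouse_pipeline/cli.py | _parse_named_queries
-- ===== SOURCE A (Python) =====
-- def _parse_named_queries(sql_text: str) -> dict[str, str]:
--     queries: dict[str, str] = {}
--     current_name: str | None = None
--     current_lines: list[str] = []
--
--     for line in sql_text.splitlines():
--         if line.strip().startswith("-- name:"):
--             if current_name and current_lines:
--                 queries[current_name] = "\n".join(current_lines).strip()
--             current_name = line.split(":", 1)[1].strip()
--             current_lines = []
--             continue
--         current_lines.append(line)
--
--     if current_name and current_lines: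
--         queries[current_name] = "\n".join(current_lines).strip()
--
--     return queries
-- ===== SOURCE B (Python) =====
-- def _is_marker(line: str) -> bool:
--     return line.strip().startswith("-- name:")
--
--
-- def _parse_named_queries(sql_text: str) -> dict[str, str]:
--     queries: dict[str, str] = {}
--     rest = sql_text.splitlines()
--     # skip the preamble before the first marker line
--     while rest and not _is_marker(rest[0]):
--         rest = rest[1:]
--     # each round consumes one marker line and the block up to the next marker
--     while rest:
--         header, tail = rest[0], rest[1:]
--         j = 0
--         while j < len(tail) and not _is_marker(tail[j]):
--             j += 1
--         block, rest = tail[:j], tail[j:]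
--         name = header.split(":", 1)[1].strip()
--         if name and block:
--             queries[name] = "\n".join(block).strip()
--     return queries
-- ===== Notes on version B (the rewrite author's own statement) =====
-- stated objective: alternative
-- what changed: Replaces A's single fold carrying (dict, current_name, current_lines) accumulator state by a stateless block-at-a-time decomposition: skip the preamble, then repeatedly consume one marker header and the slice of lines up to the next marker.
import Mathlib
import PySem

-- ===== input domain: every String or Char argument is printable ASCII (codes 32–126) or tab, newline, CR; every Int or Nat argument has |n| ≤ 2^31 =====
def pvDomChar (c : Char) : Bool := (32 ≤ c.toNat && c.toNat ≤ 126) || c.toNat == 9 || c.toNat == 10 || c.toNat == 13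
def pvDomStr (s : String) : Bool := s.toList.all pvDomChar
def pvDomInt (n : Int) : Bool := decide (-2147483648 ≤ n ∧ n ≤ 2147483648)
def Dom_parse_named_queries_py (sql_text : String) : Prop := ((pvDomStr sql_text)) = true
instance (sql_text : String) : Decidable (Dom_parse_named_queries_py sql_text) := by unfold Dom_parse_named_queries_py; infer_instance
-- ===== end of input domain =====

-- B parses the same named-query format block-at-a-time (skip preamble, then one header plus the
-- slice of lines up to the next marker) instead of A's one fold carrying
-- (dict, current_name, current_lines) accumulator state.

-- helpers shared by both ports (these sub-expressions occur verbatim in both Pythons)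
-- line.strip().startswith("-- name:")
def pvIsMarker (line : String) : Bool :=
  PySem.Str.startswith (PySem.Str.strip line) "-- name:"

-- line.split(":", 1)[1].strip()  (only evaluated on marker lines, which always contain ':';
-- the "" default of pyGetD is unreachable there)
def pvNameOf (line : String) : String :=
  PySem.Str.strip (PySem.List.pyGetD ((PySem.Str.splitMax? line ":" 1).getD []) 1 "")

-- ===== PORT A =====
-- 'if current_name and current_lines: queries[current_name] = "\n".join(current_lines).strip()'
def pvFlushA (d : PySem.Dict String String) (cn : Option String) (cls : List String) :
    PySem.Dict String String :=
  match cn with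
  | none => d
  | some n => if n = "" ∨ cls = [] then d else d.insert n (PySem.Str.strip (PySem.Str.join "\n" cls))

-- the body of A's for-loop over splitlines
def pvStepA (st : PySem.Dict String String × Option String × List String) (line : String) :
    PySem.Dict String String × Option String × List String :=
  if pvIsMarker line then (pvFlushA st.1 st.2.1 st.2.2, some (pvNameOf line), [])
  else (st.1, st.2.1, st.2.2 ++ [line])

def parse_named_queries_py (sql_text : String) : List (String × String) :=
  let st := (PySem.Str.splitlines sql_text).foldl pvStepA (PySem.Dict.empty, none, [])
  (pvFlushA st.1 st.2.1 st.2.2).items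

-- ===== PORT B =====
-- Source B's outer while loop: consume one header line plus the block up to the next marker
-- (the inner index loop building tail[:j] / tail[j:] is takeWhile/dropWhile on the non-marker test)
def pvGoB (d : PySem.Dict String String) (rest : List String) : PySem.Dict String String :=
  match rest with
  | [] => d
  | header :: tail =>
    let block := tail.takeWhile (fun l => !pvIsMarker l)
    let rest' := tail.dropWhile (fun l => !pvIsMarker l)
    let name := pvNameOf header
    pvGoB (if name ≠ "" ∧ block ≠ [] then
             d.insert name (PySem.Str.strip (PySem.Str.join "\n" block))
           else d) rest'
termination_by rest.length
decreasing_by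
  simp only [List.length_cons]
  have := List.length_dropWhile_le (fun l => !pvIsMarker l) tail
  omega

def parse_named_queries_py_alt (sql_text : String) : List (String × String) :=
  (pvGoB PySem.Dict.empty
    ((PySem.Str.splitlines sql_text).dropWhile (fun l => !pvIsMarker l))).items

-- ===== PRECONDITION & SPEC =====
def Spec_parse_named_queries_py (sql_text : String) (out : List (String × String)) : Prop := out = parse_named_queries_py_alt sql_text
instance (sql_text : String) (out : List (String × String)) : Decidable (Spec_parse_named_queries_py sql_text out) := by unfold Spec_parse_named_queries_py; infer_instance

-- ===== CLAIM (what is proved, stated in full; the proofs are below) =====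
def Claim_equal_parse_named_queries_py : Prop := ∀ (sql_text : String), Dom_parse_named_queries_py sql_text → Spec_parse_named_queries_py sql_text (parse_named_queries_py sql_text)

-- ===== LEMMAS AND PROOFS =====

-- proof-side name for A's "run the fold, then flush the trailing block"
def pvRunA (st : PySem.Dict String String × Option String × List String) (rest : List String) :
    PySem.Dict String String :=
  let st' := rest.foldl pvStepA st
  pvFlushA st'.1 st'.2.1 st'.2.2

lemma pvRunA_cons (st : PySem.Dict String String × Option String × List String) (l : String)
    (rest : List String) : pvRunA st (l :: rest) = pvRunA (pvStepA st l) rest := rfl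

lemma pvFlushA_none (d : PySem.Dict String String) (cls : List String) :
    pvFlushA d none cls = d := rfl

lemma pvFlushA_some (d : PySem.Dict String String) (m : String) (ls : List String) :
    pvFlushA d (some m) ls =
      if m ≠ "" ∧ ls ≠ [] then d.insert m (PySem.Str.strip (PySem.Str.join "\n" ls)) else d := by
  simp only [pvFlushA]
  split_ifs with h1 h2 h2 <;> tauto

lemma pvGoB_nil (d : PySem.Dict String String) : pvGoB d [] = d := by
  rw [pvGoB.eq_def]

lemma pvGoB_cons (d : PySem.Dict String String) (header : String) (tail : List String) :
    pvGoB d (header :: tail) =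
      pvGoB (pvFlushA d (some (pvNameOf header)) (tail.takeWhile (fun l => !pvIsMarker l)))
        (tail.dropWhile (fun l => !pvIsMarker l)) := by
  conv_lhs => rw [pvGoB.eq_def]
  rw [pvFlushA_some]

-- the head of the dropWhile remainder is a marker line
lemma pv_marker_head (lines : List String) (h : String) (t : List String)
    (hd : lines.dropWhile (fun l => !pvIsMarker l) = h :: t) : pvIsMarker h = true := by
  have hne : lines.dropWhile (fun l => !pvIsMarker l) ≠ [] := by rw [hd]; simp
  have hhead := List.head_dropWhile_not (fun l => !pvIsMarker l) hne
  have h1 : (lines.dropWhile (fun l => !pvIsMarker l)).head hne = h := by simp [hd]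
  rw [h1] at hhead; simpa using hhead

-- A's fold over a marker-free segment only appends the lines to current_lines
lemma pv_fold_no_marker (seg : List String) (h : ∀ l ∈ seg, pvIsMarker l = false) :
    ∀ st : PySem.Dict String String × Option String × List String,
      seg.foldl pvStepA st = (st.1, st.2.1, st.2.2 ++ seg) := by
  induction seg with
  | nil => intro st; simp
  | cons x xs ih =>
    intro st
    have hx : pvIsMarker x = false := h x (by simp)
    simp only [List.foldl_cons, pvStepA, hx, Bool.false_eq_true, if_false]
    rw [ih (fun l hl => h l (by simp [hl]))]
    simp

-- main invariant: from an open block (d, some n, cls), A's fold-then-flush equals B's block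
-- loop after absorbing the marker-free prefix of rest into the pending lines
lemma pv_main (k : Nat) : ∀ (rest : List String), rest.length ≤ k →
    ∀ (d : PySem.Dict String String) (n : String) (cls : List String),
    pvRunA (d, some n, cls) rest =
      pvGoB (pvFlushA d (some n) (cls ++ rest.takeWhile (fun l => !pvIsMarker l)))
        (rest.dropWhile (fun l => !pvIsMarker l)) := by
  induction k with
  | zero =>
    intro rest hlen d n cls
    have : rest = [] := List.eq_nil_of_length_eq_zero (Nat.le_zero.mp hlen)
    subst this
    simp [pvRunA, pvGoB_nil]
  | succ k ih =>
    intro rest hlen d n cls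
    have hsplit := List.takeWhile_append_dropWhile (p := fun l => !pvIsMarker l) (l := rest)
    have hsegF : ∀ l ∈ rest.takeWhile (fun l => !pvIsMarker l), pvIsMarker l = false := by
      intro l hl
      have := List.mem_takeWhile_imp hl
      simpa using this
    cases hdrop : rest.dropWhile (fun l => !pvIsMarker l) with
    | nil =>
      have hrest : rest = rest.takeWhile (fun l => !pvIsMarker l) := by
        conv_lhs => rw [← hsplit]
        rw [hdrop, List.append_nil]
      rw [pvGoB_nil]
      conv_lhs => rw [hrest]
      simp [pvRunA, pv_fold_no_marker _ hsegF]
    | cons h t =>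
      have hh : pvIsMarker h = true := pv_marker_head rest h t hdrop
      have hrest : rest = rest.takeWhile (fun l => !pvIsMarker l) ++ h :: t := by
        conv_lhs => rw [← hsplit]
        rw [hdrop]
      have hlen' : t.length ≤ k := by
        have := congrArg List.length hrest
        simp at this; omega
      conv_lhs => rw [hrest]
      rw [show pvRunA (d, some n, cls) (rest.takeWhile (fun l => !pvIsMarker l) ++ h :: t) =
            pvRunA ((d, some n, cls).1, (d, some n, cls).2.1,
              (d, some n, cls).2.2 ++ rest.takeWhile (fun l => !pvIsMarker l)) (h :: t) by
          simp [pvRunA, List.foldl_append, pv_fold_no_marker _ hsegF]]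
      rw [pvRunA_cons]
      simp only [pvStepA, hh, if_true]
      rw [ih t hlen' (pvFlushA d (some n) (cls ++ rest.takeWhile (fun l => !pvIsMarker l)))
        (pvNameOf h) []]
      rw [pvGoB_cons]
      simp

-- the whole run: A on any line list equals B's loop started after the preamble
lemma pv_runA_eq_goB (lines : List String) :
    pvRunA (PySem.Dict.empty, none, []) lines =
      pvGoB PySem.Dict.empty (lines.dropWhile (fun l => !pvIsMarker l)) := by
  have hsplit := List.takeWhile_append_dropWhile (p := fun l => !pvIsMarker l) (l := lines)
  have hsegF : ∀ l ∈ lines.takeWhile (fun l => !pvIsMarker l), pvIsMarker l = false := by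
    intro l hl
    have := List.mem_takeWhile_imp hl
    simpa using this
  cases hdrop : lines.dropWhile (fun l => !pvIsMarker l) with
  | nil =>
    have hrest : lines = lines.takeWhile (fun l => !pvIsMarker l) := by
      conv_lhs => rw [← hsplit]
      rw [hdrop, List.append_nil]
    rw [pvGoB_nil]
    conv_lhs => rw [hrest]
    simp [pvRunA, pv_fold_no_marker _ hsegF, pvFlushA_none]
  | cons h t =>
    have hh : pvIsMarker h = true := pv_marker_head lines h t hdrop
    have hrest : lines = lines.takeWhile (fun l => !pvIsMarker l) ++ h :: t := by
      conv_lhs => rw [← hsplit]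
      rw [hdrop]
    conv_lhs => rw [hrest]
    rw [show pvRunA (PySem.Dict.empty, none, [])
          (lines.takeWhile (fun l => !pvIsMarker l) ++ h :: t) =
        pvRunA (PySem.Dict.empty, none, lines.takeWhile (fun l => !pvIsMarker l)) (h :: t) by
      simp [pvRunA, List.foldl_append, pv_fold_no_marker _ hsegF]]
    rw [pvRunA_cons]
    simp only [pvStepA, hh, if_true, pvFlushA_none]
    rw [pv_main t.length t (le_refl _) PySem.Dict.empty (pvNameOf h) []]
    rw [pvGoB_cons]
    simp

-- ===== VERDICT (by name: the statement is the Claim_ definition above) =====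
theorem parse_named_queries_py_spec : Claim_equal_parse_named_queries_py := by
  intro sql_text _
  unfold Spec_parse_named_queries_py
  show (pvRunA (PySem.Dict.empty, none, []) (PySem.Str.splitlines sql_text)).items =
    parse_named_queries_py_alt sql_text
  rw [pv_runA_eq_goB]
  rfl
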